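-- pv_equiv track=rewrite | github.com/AkshitaJha/biased_or_flawed | create_context.py | create_ambig_context
-- ===== SOURCE A (Python) =====
-- def create_ambig_context(text, target_char_index):
--
--     # Split the text into sentences
--     sentences = text.split(" . ")
--
--     # Variable to track character position
--     char_count = 0
--     sentence_to_delete = None
--
--     # Iterate over each sentence
--     for sentence in sentences:
--         # Check if the 199th character falls within this sentence
--         if char_count <= target_char_index < char_count + len(sentence):
--             sentence_to_delete = sentence
--             break
--
--         # Update character count to reflect the position within the text
--         char_count += len(sentence) + 3  # +1 for the space after the sentence
--
--     # Remove the sentence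
--     if sentence_to_delete:
--         updated_text = text.replace(sentence_to_delete, "").strip()
--         return updated_text
--     else:
--         return ""
-- ===== SOURCE B (Python) =====
-- def create_ambig_context(text, target_char_index):
--     # Split once, build a prefix table of sentence start offsets, then
--     # binary-search (bisect_right, hand-rolled) for the candidate sentence.
--     sentences = text.split(" . ")
--     starts = [0]
--     for s in sentences[:-1]:
--         starts.append(starts[-1] + len(s) + 3)
--     # bisect_right(starts, target_char_index)
--     lo, hi = 0, len(starts)
--     while lo < hi:
--         mid = (lo + hi) // 2
--         if starts[mid] <= target_char_index:
--             lo = mid + 1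
--         else:
--             hi = mid
--     k = lo - 1
--     if k >= 0:
--         s = sentences[k]
--         if target_char_index < starts[k] + len(s):
--             return text.replace(s, "").strip()
--     return ""
-- ===== Notes on version B (the rewrite author's own statement) =====
-- stated objective: alternative
-- what changed: Replaces the linear accumulate-and-scan for the containing sentence with a precomputed prefix table of sentence start offsets plus a hand-rolled bisect_right binary search for the last start <= target, then a single containment check.
import Mathlib
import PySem

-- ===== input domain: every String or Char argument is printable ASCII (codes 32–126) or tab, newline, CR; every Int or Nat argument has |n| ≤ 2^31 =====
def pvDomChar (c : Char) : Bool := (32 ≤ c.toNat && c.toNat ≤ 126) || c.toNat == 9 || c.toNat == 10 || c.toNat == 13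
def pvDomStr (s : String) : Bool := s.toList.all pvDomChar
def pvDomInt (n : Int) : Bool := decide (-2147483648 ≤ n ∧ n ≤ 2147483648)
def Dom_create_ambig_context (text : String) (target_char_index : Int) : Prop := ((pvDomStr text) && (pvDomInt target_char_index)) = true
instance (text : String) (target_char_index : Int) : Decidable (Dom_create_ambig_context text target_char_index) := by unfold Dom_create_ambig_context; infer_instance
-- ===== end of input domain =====

-- B replaces A's linear accumulate-and-scan with a prefix table of sentence
-- start offsets plus a hand-rolled bisect_right binary search (alternative
-- decomposition; same final replace/strip step).

-- ===== PORT A =====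
-- the for-loop with break: scan sentences, accumulating char_count
def caLoopA : List String → Int → Int → Option String
  | [], _, _ => none
  | s :: rest, cc, t =>
    if cc ≤ t ∧ t < cc + PySem.Str.len s then some s
    else caLoopA rest (cc + PySem.Str.len s + 3) t

def create_ambig_context (text : String) (target_char_index : Int) : String :=
  let sentences := (PySem.Str.split? text " . ").getD []   -- sep " . " ≠ "", so split? is always some
  let std := caLoopA sentences 0 target_char_index
  -- Python truthiness of Optional[str]: falsy iff None or "" (encoded via getD "")
  if std.getD "" = "" then "" else PySem.Str.strip (PySem.Str.replace text (std.getD "") "")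

-- ===== PORT B =====
-- the starts-building loop of Source B: starts = [0]; for s in sentences[:-1]: append last+len+3
def caStarts (sents : List String) : List Int :=
  sents.foldl (fun acc s => acc ++ [acc.getLast! + PySem.Str.len s + 3]) [0]

-- the hand-rolled bisect_right while-loop of Source B; fuel = hi - lo bounds the
-- iteration count (each pass shrinks hi - lo), so fuel never runs out early
def caBisect (starts : List Int) (t : Int) : Nat → Nat → Nat → Nat
  | 0, lo, _ => lo
  | fuel + 1, lo, hi =>
    if lo < hi then
      if starts.getD ((lo + hi) / 2) 0 ≤ t then caBisect starts t fuel ((lo + hi) / 2 + 1) hi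
      else caBisect starts t fuel lo ((lo + hi) / 2)
    else lo

def create_ambig_context_alt (text : String) (target_char_index : Int) : String :=
  let sentences := (PySem.Str.split? text " . ").getD []   -- sep " . " ≠ "", so split? is always some
  let starts := caStarts sentences.dropLast
  let lo := caBisect starts target_char_index starts.length 0 starts.length
  -- Python: k = lo - 1; if k >= 0:  (lo : Nat here, so k ≥ 0 ↔ 1 ≤ lo)
  if 1 ≤ lo then
    let k := lo - 1
    let s := sentences.getD k ""
    if target_char_index < starts.getD k 0 + PySem.Str.len s then
      PySem.Str.strip (PySem.Str.replace text s "")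
    else ""
  else ""

-- ===== PRECONDITION & SPEC =====
def Spec_create_ambig_context (text : String) (target_char_index : Int) (out : String) : Prop := out = create_ambig_context_alt text target_char_index
instance (text : String) (target_char_index : Int) (out : String) : Decidable (Spec_create_ambig_context text target_char_index out) := by unfold Spec_create_ambig_context; infer_instance

-- ===== CLAIM (what is proved, stated in full; the proofs are below) =====
def Claim_equal_create_ambig_context : Prop := ∀ (text : String) (target_char_index : Int), Dom_create_ambig_context text target_char_index → Spec_create_ambig_context text target_char_index (create_ambig_context text target_char_index)

-- ===== LEMMAS AND PROOFS =====

lemma caLen_nonneg (s : String) : 0 ≤ PySem.Str.len s := by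
  rw [PySem.Str.len_eq]; exact_mod_cast Nat.zero_le _

-- reference form of the prefix-start table
def caStartsRec : Int → List String → List Int
  | c, [] => [c]
  | c, s :: r => c :: caStartsRec (c + PySem.Str.len s + 3) r

lemma caStartsRec_cons (c : Int) (l : List String) :
    ∃ tl, caStartsRec c l = c :: tl := by
  cases l with
  | nil => exact ⟨[], rfl⟩
  | cons s r => exact ⟨_, rfl⟩

lemma caStartsRec_lb (c : Int) (l : List String) :
    ∀ x ∈ caStartsRec c l, c ≤ x := by
  induction l generalizing c with
  | nil => intro x hx; simp [caStartsRec] at hx; omega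
  | cons s r ih =>
    intro x hx
    have h0 := caLen_nonneg s
    simp only [caStartsRec, List.mem_cons] at hx
    rcases hx with rfl | hx
    · omega
    · have := ih (c + PySem.Str.len s + 3) x hx; omega

lemma caStartsRec_pairwise (c : Int) (l : List String) :
    (caStartsRec c l).Pairwise (· < ·) := by
  induction l generalizing c with
  | nil => simp [caStartsRec]
  | cons s r ih =>
    refine List.Pairwise.cons ?_ (ih _)
    intro x hx
    have h0 := caLen_nonneg s
    have := caStartsRec_lb (c + PySem.Str.len s + 3) r x hx
    omega

lemma caStarts_foldl (l : List String) :
    ∀ (acc : List Int) (c : Int), acc.getLast! = c →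
      l.foldl (fun acc s => acc ++ [acc.getLast! + PySem.Str.len s + 3]) acc
        = acc ++ (caStartsRec c l).tail := by
  induction l with
  | nil => intro acc c _; simp [caStartsRec]
  | cons s r ih =>
    intro acc c hc
    simp only [List.foldl_cons, caStartsRec]
    rw [ih (acc ++ [acc.getLast! + PySem.Str.len s + 3]) (c + PySem.Str.len s + 3)
        (by rw [hc]; simp), hc]
    obtain ⟨tl, htl⟩ := caStartsRec_cons (c + PySem.Str.len s + 3) r
    rw [htl]; simp

lemma caStarts_eq (l : List String) : caStarts l = caStartsRec 0 l := by
  unfold caStarts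
  rw [caStarts_foldl l [0] 0 (by simp)]
  obtain ⟨tl, htl⟩ := caStartsRec_cons 0 l
  rw [htl]; simp

-- takeWhile boundary on a strictly increasing list
lemma tw_iff (t : Int) : ∀ (v : List Int), v.Pairwise (· < ·) →
    ∀ i, i < v.length →
      (v.getD i 0 ≤ t ↔ i < (v.takeWhile (fun x => decide (x ≤ t))).length) := by
  intro v
  induction v with
  | nil => intro _ i hi; simp at hi
  | cons a r ih =>
    intro hp i hi
    by_cases ha : a ≤ t
    · rw [List.takeWhile_cons_of_pos (by simpa using ha)]
      cases i with
      | zero => simpa using ha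
      | succ j =>
        have hj : j < r.length := by simpa using hi
        have := ih (List.pairwise_cons.mp hp).2 j hj
        simpa using this
    · rw [List.takeWhile_cons_of_neg (by simpa using ha)]
      cases i with
      | zero => simpa using ha
      | succ j =>
        have hj : j < r.length := by simpa using hi
        have hlt : a < r.getD j 0 := by
          rw [List.getD_eq_getElem r 0 hj]
          exact (List.pairwise_cons.mp hp).1 _ (List.getElem_mem hj)
        have hta : t < a := lt_of_not_ge ha
        have hno : ¬ (r.getD j 0 ≤ t) := by omega
        simp only [List.getD_cons_succ, List.length_nil]
        exact iff_of_false hno (by omega)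

-- invariant-based correctness of the bisect loop
lemma caBisect_eq (v : List Int) (t : Int) (L : Nat)
    (hL : ∀ i, i < v.length → (v.getD i 0 ≤ t ↔ i < L)) :
    ∀ d lo hi, hi - lo ≤ d → lo ≤ L → L ≤ hi → hi ≤ v.length →
      caBisect v t d lo hi = L := by
  intro d
  induction d with
  | zero =>
    intro lo hi hd h1 h2 _
    simp only [caBisect]
    omega
  | succ d ih =>
    intro lo hi hd h1 h2 h3
    simp only [caBisect]
    by_cases hlh : lo < hi
    · simp only [hlh, if_true]
      have hmidlt : (lo + hi) / 2 < hi := by omega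
      have hmidge : lo ≤ (lo + hi) / 2 := by omega
      have hmidlen : (lo + hi) / 2 < v.length := by omega
      by_cases hc : v.getD ((lo + hi) / 2) 0 ≤ t
      · simp only [hc, if_true]
        have : (lo + hi) / 2 < L := (hL _ hmidlen).mp hc
        exact ih ((lo + hi) / 2 + 1) hi (by omega) (by omega) h2 h3
      · simp only [hc, if_false]
        have : ¬ ((lo + hi) / 2 < L) := fun h => hc ((hL _ hmidlen).mpr h)
        exact ih lo ((lo + hi) / 2) (by omega) h1 (by omega) (by omega)
    · simp only [hlh, if_false]
      omega

-- if the running offset already exceeds the target, the scan finds nothing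
lemma caLoopA_gap : ∀ (sents : List String) (c t : Int), t < c → caLoopA sents c t = none := by
  intro sents
  induction sents with
  | nil => intro c t _; rfl
  | cons s r ih =>
    intro c t h
    have h0 := caLen_nonneg s
    unfold caLoopA
    rw [if_neg (by omega)]
    exact ih _ t (by omega)

-- characterisation of A's scan via the prefix-start table
lemma caLoopA_char : ∀ (sents : List String) (c t : Int), c ≤ t →
    caLoopA sents c t =
      (let v := caStartsRec c sents.dropLast
       let k := (v.takeWhile (fun x => decide (x ≤ t))).length - 1
       let s := sents.getD k ""
       if t < v.getD k 0 + PySem.Str.len s then some s else none) := by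
  intro sents
  induction sents with
  | nil =>
    intro c t hct
    simp only [caLoopA, List.dropLast_nil, caStartsRec]
    rw [List.takeWhile_cons_of_pos (by exact decide_eq_true hct)]
    have hlen0 : PySem.Str.len "" = 0 := by rw [PySem.Str.len_eq]; rfl
    simp only [List.takeWhile_nil, List.length_cons, List.length_nil, Nat.zero_add,
      Nat.sub_self, List.getD_cons_zero, List.getD_nil]
    rw [hlen0, if_neg (by omega)]
  | cons s rest ih =>
    intro c t hct
    have h0 := caLen_nonneg s
    unfold caLoopA
    by_cases hmatch : c ≤ t ∧ t < c + PySem.Str.len s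
    · rw [if_pos hmatch]
      cases rest with
      | nil =>
        have hdl : (s :: ([] : List String)).dropLast = [] := rfl
        rw [hdl]
        simp only [caStartsRec]
        rw [List.takeWhile_cons_of_pos (by exact decide_eq_true hct)]
        simp only [List.takeWhile_nil, List.length_cons, List.length_nil, Nat.zero_add,
          Nat.sub_self, List.getD_cons_zero]
        rw [if_pos hmatch.2]
      | cons r rs =>
        have hdl : (s :: r :: rs).dropLast = s :: (r :: rs).dropLast := rfl
        rw [hdl]
        simp only [caStartsRec]
        rw [List.takeWhile_cons_of_pos (by exact decide_eq_true hct)]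
        obtain ⟨tl, htl⟩ := caStartsRec_cons (c + PySem.Str.len s + 3) (r :: rs).dropLast
        rw [htl, List.takeWhile_cons_of_neg (by rw [decide_eq_true_eq]; omega)]
        simp only [List.length_cons, List.length_nil, Nat.zero_add,
          Nat.sub_self, List.getD_cons_zero]
        rw [if_pos hmatch.2]
    · rw [if_neg hmatch]
      have hlen : c + PySem.Str.len s ≤ t := by
        rcases not_and_or.mp hmatch with h | h
        · omega
        · omega
      by_cases hgap : t < c + PySem.Str.len s + 3
      · -- target falls in the separator gap after s
        rw [caLoopA_gap rest _ t (by omega)]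
        cases rest with
        | nil =>
          have hdl : (s :: ([] : List String)).dropLast = [] := rfl
          rw [hdl]
          simp only [caStartsRec]
          rw [List.takeWhile_cons_of_pos (by exact decide_eq_true hct)]
          simp only [List.takeWhile_nil, List.length_cons, List.length_nil, Nat.zero_add,
            Nat.sub_self, List.getD_cons_zero]
          rw [if_neg (by omega)]
        | cons r rs =>
          have hdl : (s :: r :: rs).dropLast = s :: (r :: rs).dropLast := rfl
          rw [hdl]
          simp only [caStartsRec]
          rw [List.takeWhile_cons_of_pos (by exact decide_eq_true hct)]
          obtain ⟨tl, htl⟩ := caStartsRec_cons (c + PySem.Str.len s + 3) (r :: rs).dropLast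
          rw [htl, List.takeWhile_cons_of_neg (by rw [decide_eq_true_eq]; omega)]
          simp only [List.length_cons, List.length_nil, Nat.zero_add,
            Nat.sub_self, List.getD_cons_zero]
          rw [if_neg (by omega)]
      · -- recurse: target is at or past the start of the next sentence
        have hct' : c + PySem.Str.len s + 3 ≤ t := by omega
        rw [ih (c + PySem.Str.len s + 3) t hct']
        cases rest with
        | nil =>
          have hdl : (s :: ([] : List String)).dropLast = [] := rfl
          rw [hdl]
          simp only [List.dropLast_nil, caStartsRec]
          rw [List.takeWhile_cons_of_pos (by exact decide_eq_true (show c + PySem.Str.len s + 3 ≤ t by omega)),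
            List.takeWhile_cons_of_pos (by exact decide_eq_true hct)]
          have hlen0 : PySem.Str.len "" = 0 := by rw [PySem.Str.len_eq]; rfl
          simp only [List.takeWhile_nil, List.length_cons, List.length_nil, Nat.zero_add,
            Nat.sub_self, List.getD_cons_zero, List.getD_nil]
          rw [hlen0, if_neg (by omega), if_neg (by omega)]
        | cons r rs =>
          have hdl : (s :: r :: rs).dropLast = s :: (r :: rs).dropLast := rfl
          rw [hdl]
          simp only [caStartsRec]
          rw [List.takeWhile_cons_of_pos (by exact decide_eq_true hct)]
          obtain ⟨tl, htl⟩ := caStartsRec_cons (c + PySem.Str.len s + 3) (r :: rs).dropLast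
          have hW1 : 1 ≤ ((caStartsRec (c + PySem.Str.len s + 3) (r :: rs).dropLast).takeWhile
              (fun x => decide (x ≤ t))).length := by
            rw [htl, List.takeWhile_cons_of_pos (by exact decide_eq_true (show c + PySem.Str.len s + 3 ≤ t by omega))]
            simp only [List.length_cons]
            omega
          obtain ⟨m, hm⟩ : ∃ m, ((caStartsRec (c + PySem.Str.len s + 3) (r :: rs).dropLast).takeWhile
              (fun x => decide (x ≤ t))).length = m + 1 :=
            ⟨((caStartsRec (c + PySem.Str.len s + 3) (r :: rs).dropLast).takeWhile
              (fun x => decide (x ≤ t))).length - 1, by omega⟩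
          simp only [List.length_cons, Nat.add_sub_cancel]
          rw [hm]
          simp only [Nat.add_sub_cancel, List.getD_cons_succ]

-- ===== VERDICT (by name: the statement is the Claim_ definition above) =====
theorem create_ambig_context_spec : Claim_equal_create_ambig_context := by
  intro text t _
  unfold Spec_create_ambig_context create_ambig_context create_ambig_context_alt
  simp only [caStarts_eq]
  set sents := (PySem.Str.split? text " . ").getD [] with hsents
  set v := caStartsRec 0 sents.dropLast with hv
  set L := (v.takeWhile (fun x => decide (x ≤ t))).length with hL
  have hpw : v.Pairwise (· < ·) := caStartsRec_pairwise 0 sents.dropLast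
  have hiff := tw_iff t v hpw
  have hLlen : L ≤ v.length := by
    rw [hL]; exact (List.takeWhile_sublist _).length_le
  have hbis : caBisect v t v.length 0 v.length = L :=
    caBisect_eq v t L (fun i hi => hiff i hi) v.length 0 v.length (by omega) (by omega) hLlen le_rfl
  rw [hbis]
  obtain ⟨tl, htl⟩ := caStartsRec_cons 0 sents.dropLast
  by_cases ht : 0 ≤ t
  · have hL1 : 1 ≤ L := by
      rw [hL, hv, htl, List.takeWhile_cons_of_pos (by exact decide_eq_true ht)]
      simp only [List.length_cons]
      omega
    rw [caLoopA_char sents 0 t ht]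
    simp only [← hv, ← hL]
    rw [if_pos hL1]
    by_cases hcond : t < v.getD (L - 1) 0 + PySem.Str.len (sents.getD (L - 1) "")
    · rw [if_pos hcond, if_pos hcond]
      -- matched sentence is non-empty: its start is ≤ t < start + len
      have hklen : L - 1 < v.length := by omega
      have hstart : v.getD (L - 1) 0 ≤ t := (hiff (L - 1) hklen).mpr (by omega)
      have hpos : 0 < PySem.Str.len (sents.getD (L - 1) "") := by omega
      have hne : sents.getD (L - 1) "" ≠ "" := by
        intro h
        rw [h, PySem.Str.len_eq] at hpos
        simp at hpos
      simp only [Option.getD_some]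
      rw [if_neg hne]
    · rw [if_neg hcond, if_neg hcond]
      simp
  · have hL0 : L = 0 := by
      rw [hL, hv, htl, List.takeWhile_cons_of_neg (by rw [decide_eq_true_eq]; exact ht)]
      rfl
    rw [caLoopA_gap sents 0 t (by omega), hL0]
    simp
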